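-- pv_equiv track=rewrite | github.com/parhamf6/python-exercises | questions/QueraTests/Rank.py | find_nth_person_number
-- ===== SOURCE A (Python) =====
-- def find_nth_person_number(k, n, numbers):
--     # Extend the list to ensure it has at least 'n' elements
--     while len(numbers) < n:
--         # For each new person, determine the smallest number they can take
--         current_length = len(numbers)
--         if current_length < k:
--             look_ahead_range = numbers[:current_length]
--         else:
--             look_ahead_range = numbers[current_length - k:current_length]
--
--         # Convert the range to a set to remove duplicates
--         look_ahead_set = set(look_ahead_range)
--
--         # Find the smallest missing positive integer
--         smallest_number = 1
--         while smallest_number in look_ahead_set: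
--             smallest_number += 1
--
--         # Append this smallest number to the list
--         numbers.append(smallest_number)
--
--     # Return the number of the n-th person in the line
--     return numbers[n-1]
-- ===== SOURCE B (Python) =====
-- def find_nth_person_number(k, n, numbers):
--     # Same return value as the original; does not mutate `numbers`.
--     ext = list(numbers)
--     window = list(ext[-k:]) if k > 0 else []
--     for _ in range(n - len(ext)):
--         # mex of the window: sort its distinct values and scan with early exit
--         vals = sorted(set(window))
--         m = 1
--         for v in vals:
--             if v == m:
--                 m += 1
--             elif v > m:
--                 break
--         ext.append(m)
--         # maintain the window incrementally instead of re-slicing ext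
--         if k > 0:
--             window.append(m)
--             if len(window) > k:
--                 del window[0]
--     return ext[n - 1]
-- ===== Notes on version B (the rewrite author's own statement) =====
-- stated objective: alternative
-- what changed: B replaces A's mex-by-incrementing-a-candidate-through-a-set with a sort-the-distinct-window-then-scan-with-early-break mex, maintains the sliding window incrementally (append + pop-front) instead of re-slicing the growing list each iteration, runs a fixed-count for-range loop instead of A's while, and leaves the input list unmutated.
import Mathlib
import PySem

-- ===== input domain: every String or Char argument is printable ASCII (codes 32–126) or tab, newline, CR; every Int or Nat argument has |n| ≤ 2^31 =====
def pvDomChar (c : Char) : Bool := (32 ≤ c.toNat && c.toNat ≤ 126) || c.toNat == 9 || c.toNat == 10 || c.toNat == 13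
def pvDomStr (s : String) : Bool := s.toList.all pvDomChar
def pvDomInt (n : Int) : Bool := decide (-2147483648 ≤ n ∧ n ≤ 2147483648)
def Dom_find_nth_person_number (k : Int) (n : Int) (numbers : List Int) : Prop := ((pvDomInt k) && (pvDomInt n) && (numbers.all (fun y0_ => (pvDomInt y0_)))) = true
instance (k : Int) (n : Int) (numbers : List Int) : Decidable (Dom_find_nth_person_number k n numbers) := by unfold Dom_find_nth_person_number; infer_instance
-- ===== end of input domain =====

-- B computes the sliding-window mex by sorting the window's distinct values and scanning with
-- early exit, maintains the window incrementally instead of re-slicing, and does not mutate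
-- `numbers` (A appends to it in place; only the return value is claimed equal).


-- ===== PORT A =====
-- `while smallest_number in look_ahead_set: smallest_number += 1`; the loop body runs at most
-- |look_ahead_set| times (each hit is a distinct member), so fuel = |set| + 1 is exact.
def pvMexLoopA (s : List Int) (m : Int) : Nat → Int
  | 0 => m
  | fuel + 1 => if m ∈ s then pvMexLoopA s (m + 1) fuel else m

-- one body of A's outer while loop: slice the window, set it, find the smallest missing positive
def pvStepA (k : Int) (xs : List Int) : Int :=
  let cl : Int := xs.length
  let lookAheadRange :=
    if cl < k then PySem.List.slice xs none (some cl)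
    else PySem.List.slice xs (some (cl - k)) (some cl)
  let lookAheadSet := PySem.Set.ofList lookAheadRange
  pvMexLoopA lookAheadSet 1 (lookAheadSet.length + 1)

-- `while len(numbers) < n: … numbers.append(…)`; each pass grows the list by one, so
-- fuel = (n - len(numbers)).toNat covers every pass and the guard is re-checked as in Python.
def pvExtendA (k : Int) (n : Int) (xs : List Int) : Nat → List Int
  | 0 => xs
  | fuel + 1 =>
    if (xs.length : Int) < n then pvExtendA k n (xs ++ [pvStepA k xs]) fuel else xs

def find_nth_person_number (k : Int) (n : Int) (numbers : List Int) : Int :=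
  let ext := pvExtendA k n numbers (n - numbers.length).toNat
  (PySem.List.pyGet? ext (n - 1)).getD 0   -- numbers[n-1]; none (IndexError) excluded by Pre_

-- ===== PORT B =====
-- `for v in vals: if v == m: m += 1 elif v > m: break` over vals = sorted(set(window))
def pvMexScan (vals : List Int) (m : Int) : Int :=
  match vals with
  | [] => m
  | v :: rest => if v = m then pvMexScan rest (m + 1) else if m < v then m else pvMexScan rest m

-- B's for-range loop over state (ext, window); `del window[0]` on the just-extended (nonempty)
-- window is exactly `drop 1`.
def pvExtendB (k : Int) (cnt : Nat) (ext window : List Int) : List Int :=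
  match cnt with
  | 0 => ext
  | c + 1 =>
    let m := pvMexScan (PySem.List.sorted (PySem.Set.ofList window) (fun x => x) false) 1
    let w1 := window ++ [m]
    let w2 := if k < (w1.length : Int) then w1.drop 1 else w1
    pvExtendB k c (ext ++ [m]) w2

def find_nth_person_number_alt (k : Int) (n : Int) (numbers : List Int) : Int :=
  let window := if 0 < k then PySem.List.slice numbers (some (-k)) none else []
  let ext := pvExtendB k (n - numbers.length).toNat numbers window
  (PySem.List.pyGet? ext (n - 1)).getD 0

-- ===== PRECONDITION & SPEC =====
-- Pre_ excludes exactly the inputs where A raises IndexError at `numbers[n-1]`: when n ≥ 1 the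
-- extended list has length ≥ n and the index is in range; when n ≤ 0 no extension happens and
-- the negative index n-1 is in range iff 1-n ≤ len(numbers).
def Pre_find_nth_person_number (k : Int) (n : Int) (numbers : List Int) : Prop :=
  1 ≤ n ∨ 1 - n ≤ (numbers.length : Int)
instance (k : Int) (n : Int) (numbers : List Int) : Decidable (Pre_find_nth_person_number k n numbers) := by unfold Pre_find_nth_person_number; infer_instance

def pvWitness_find_nth_person_number : Int × Int × List Int := (3, 7, [1, 2])

def Spec_find_nth_person_number (k : Int) (n : Int) (numbers : List Int) (out : Int) : Prop := out = find_nth_person_number_alt k n numbers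
instance (k : Int) (n : Int) (numbers : List Int) (out : Int) : Decidable (Spec_find_nth_person_number k n numbers out) := by unfold Spec_find_nth_person_number; infer_instance

-- ===== CLAIM (what is proved, stated in full; the proofs are below) =====
def Claim_equal_find_nth_person_number : Prop := ∀ (k : Int) (n : Int) (numbers : List Int), Dom_find_nth_person_number k n numbers → Pre_find_nth_person_number k n numbers → Spec_find_nth_person_number k n numbers (find_nth_person_number k n numbers)

-- ===== LEMMAS AND PROOFS =====

-- scanning a strictly increasing list computes the least value ≥ m missing from it
theorem pvMexScan_spec (vals : List Int) (m : Int) (hp : vals.Pairwise (· < ·)) :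
    m ≤ pvMexScan vals m ∧ pvMexScan vals m ∉ vals ∧
      ∀ x, m ≤ x → x < pvMexScan vals m → x ∈ vals := by
  induction vals generalizing m with
  | nil => refine ⟨le_refl m, by simp [pvMexScan], ?_⟩; intro x h1 h2; simp [pvMexScan] at h2; omega
  | cons v rest ih =>
    rcases List.pairwise_cons.mp hp with ⟨hv, hrest⟩
    by_cases hvm : v = m
    · obtain ⟨h1, h2, h3⟩ := ih (m + 1) hrest
      refine ⟨?_, ?_, ?_⟩
      · simp [pvMexScan, hvm]; omega
      · simp [pvMexScan, hvm]
        exact ⟨by omega, h2⟩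
      · intro x hx1 hx2
        simp [pvMexScan, hvm] at hx2
        rcases eq_or_lt_of_le hx1 with h | h
        · simp [← h, hvm]
        · exact List.mem_cons_of_mem _ (h3 x (by omega) hx2)
    · by_cases hlt : m < v
      · refine ⟨?_, ?_, ?_⟩
        · simp [pvMexScan, hvm, hlt]
        · simp [pvMexScan, hvm, hlt]
          refine ⟨by omega, fun hm => ?_⟩
          have := hv m hm; omega
        · intro x hx1 hx2; simp [pvMexScan, hvm, hlt] at hx2; omega
      · obtain ⟨h1, h2, h3⟩ := ih m hrest
        refine ⟨?_, ?_, ?_⟩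
        · simp [pvMexScan, hvm, hlt]; omega
        · simp [pvMexScan, hvm, hlt]
          exact ⟨by omega, h2⟩
        · intro x hx1 hx2
          simp [pvMexScan, hvm, hlt] at hx2
          exact List.mem_cons_of_mem _ (h3 x hx1 hx2)

-- monotone filter length (Int, the two thresholds of the loop)
theorem pv_filter_len_mono (s : List Int) (m : Int) :
    (s.filter (fun x => decide (m + 1 ≤ x))).length ≤ (s.filter (fun x => decide (m ≤ x))).length := by
  induction s with
  | nil => simp
  | cons a t ih =>
    simp only [List.filter_cons]
    by_cases h1 : m + 1 ≤ a
    · rw [if_pos (by simpa using h1), if_pos (by simp; omega)]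
      simp only [List.length_cons]
      omega
    · by_cases h2 : m ≤ a
      · rw [if_neg (by simpa using h1), if_pos (by simpa using h2)]
        simp only [List.length_cons]
        omega
      · rw [if_neg (by simpa using h1), if_neg (by simpa using h2)]
        exact ih

theorem pv_filter_len_strict (s : List Int) (m : Int) (hm : m ∈ s) :
    (s.filter (fun x => decide (m + 1 ≤ x))).length < (s.filter (fun x => decide (m ≤ x))).length := by
  induction s with
  | nil => simp at hm
  | cons a t ih =>
    simp only [List.filter_cons]
    rcases List.mem_cons.mp hm with h | h
    · rw [if_neg (by simp; omega), if_pos (by simp; omega)]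
      have := pv_filter_len_mono t m
      simp only [List.length_cons]
      omega
    · have := ih h
      by_cases h1 : m + 1 ≤ a
      · rw [if_pos (by simpa using h1), if_pos (by simp; omega)]
        simp only [List.length_cons]
        omega
      · by_cases h2 : m ≤ a
        · rw [if_neg (by simpa using h1), if_pos (by simpa using h2)]
          simp only [List.length_cons]
          omega
        · rw [if_neg (by simpa using h1), if_neg (by simpa using h2)]
          exact this

-- A's counting loop computes the least value ≥ m missing from the (duplicate-free) set
theorem pvMexLoopA_spec (fuel : Nat) (s : List Int) (m : Int)
    (hf : (s.filter (fun x => decide (m ≤ x))).length < fuel) :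
    m ≤ pvMexLoopA s m fuel ∧ pvMexLoopA s m fuel ∉ s ∧
      ∀ x, m ≤ x → x < pvMexLoopA s m fuel → x ∈ s := by
  induction fuel generalizing m with
  | zero => omega
  | succ f ih =>
    by_cases hm : m ∈ s
    · have hstep : (s.filter (fun x => decide (m + 1 ≤ x))).length < f := by
        have := pv_filter_len_strict s m hm; omega
      obtain ⟨h1, h2, h3⟩ := ih (m + 1) hstep
      refine ⟨?_, ?_, ?_⟩
      · simp [pvMexLoopA, hm]; omega
      · simpa [pvMexLoopA, hm] using h2
      · intro x hx1 hx2
        simp [pvMexLoopA, hm] at hx2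
        rcases eq_or_lt_of_le hx1 with h | h
        · simpa [← h] using hm
        · exact h3 x (by omega) hx2
    · refine ⟨by simp [pvMexLoopA, hm], by simp [pvMexLoopA, hm], ?_⟩
      intro x hx1 hx2; simp [pvMexLoopA, hm] at hx2; omega

-- the least missing value is unique across the two representations of the window's members
theorem pv_mex_unique (s vals : List Int) (hmem : ∀ x : Int, x ∈ vals ↔ x ∈ s)
    (m r1 r2 : Int)
    (h1 : m ≤ r1 ∧ r1 ∉ s ∧ ∀ x, m ≤ x → x < r1 → x ∈ s)
    (h2 : m ≤ r2 ∧ r2 ∉ vals ∧ ∀ x, m ≤ x → x < r2 → x ∈ vals) : r1 = r2 := by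
  rcases lt_trichotomy r1 r2 with h | h | h
  · exact absurd ((hmem r1).mp (h2.2.2 r1 h1.1 h)) h1.2.1
  · exact h
  · exact absurd ((hmem r2).mpr (h1.2.2 r2 h2.1 h)) h2.2.1

-- the two mex computations agree on any window
theorem pv_mex_eq (w : List Int) :
    pvMexLoopA (PySem.Set.ofList w) 1 ((PySem.Set.ofList w).length + 1)
      = pvMexScan (PySem.List.sorted (PySem.Set.ofList w) (fun x => x) false) 1 := by
  apply pv_mex_unique (PySem.Set.ofList w)
      (PySem.List.sorted (PySem.Set.ofList w) (fun x => x) false)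
      (fun x => PySem.List.mem_sorted _ _ _ x) 1
  · exact pvMexLoopA_spec _ _ _ (by have := List.length_filter_le (fun x => decide ((1:Int) ≤ x)) (PySem.Set.ofList w); omega)
  · exact pvMexScan_spec _ 1 (PySem.List.sorted_ofList_pairwise_lt w)

-- A's freshly sliced window equals B's incrementally maintained one
theorem pv_window_eq (k : Int) (xs w : List Int)
    (hw : if 0 < k then w = xs.drop (xs.length - k.toNat) else w = []) :
    (if (xs.length : Int) < k then PySem.List.slice xs none (some (xs.length : Int))
     else PySem.List.slice xs (some ((xs.length : Int) - k)) (some (xs.length : Int))) = w := by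
  by_cases hk : 0 < k
  · simp only [if_pos hk] at hw
    by_cases hlt : (xs.length : Int) < k
    · rw [if_pos hlt, PySem.List.slice_to xs (by omega)]
      have : xs.length - k.toNat = 0 := by omega
      simp [hw, this, Int.toNat_natCast]
    · rw [if_neg hlt, PySem.List.slice_toNat xs (by omega) (by omega)]
      have h1 : ((xs.length : Int) - k).toNat = xs.length - k.toNat := by omega
      have h2 : (xs.length : Int).toNat = xs.length := by omega
      rw [h1, h2, hw]
      have hlen : (xs.drop (xs.length - k.toNat)).length = k.toNat := by
        simp [List.length_drop]; omega
      rw [show xs.length - (xs.length - k.toNat) = k.toNat by omega]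
      exact List.take_of_length_le hlen.le
  · simp only [if_neg hk] at hw
    rw [if_neg (by omega), PySem.List.slice_toNat xs (by omega) (by omega), hw]
    rw [show (xs.length : Int).toNat - ((xs.length : Int) - k).toNat = 0 by omega]
    simp

-- the two extension loops produce the same list under the fuel/window invariants
theorem pv_extend_eq (f : Nat) (k n : Int) (ext w : List Int)
    (hcnt : (f : Int) = n - ext.length ∨ (n ≤ (ext.length : Int) ∧ f = 0))
    (hw : if 0 < k then w = ext.drop (ext.length - k.toNat) else w = []) :
    pvExtendA k n ext f = pvExtendB k f ext w := by
  induction f generalizing ext w with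
  | zero => rfl
  | succ c ih =>
    have hlt : (ext.length : Int) < n := by
      rcases hcnt with h | h
      · push_cast at h; omega
      · exact absurd h.2 (by omega)
    simp only [pvExtendA, pvExtendB, if_pos hlt]
    have hstep : pvStepA k ext
        = pvMexScan (PySem.List.sorted (PySem.Set.ofList w) (fun x => x) false) 1 := by
      simp only [pvStepA]
      rw [pv_window_eq k ext w hw]
      exact pv_mex_eq w
    set m := pvMexScan (PySem.List.sorted (PySem.Set.ofList w) (fun x => x) false) 1 with hm
    rw [hstep]
    apply ih
    · rcases hcnt with h | h
      · left
        simp only [List.length_append, List.length_singleton]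
        push_cast at h ⊢
        omega
      · exact absurd h.2 (by omega)
    · by_cases hk : 0 < k
      · simp only [if_pos hk] at hw ⊢
        have hwlen : w.length = min k.toNat ext.length := by
          rw [hw, List.length_drop]; omega
        by_cases hkl : k.toNat ≤ ext.length
        · rw [if_pos (by simp only [List.length_append, List.length_singleton, hwlen]; push_cast; omega)]
          have hd : ext.length - k.toNat ≤ ext.length := by omega
          rw [hw, ← List.drop_append_of_le_length hd, List.drop_drop]
          congr 1
          simp only [List.length_append, List.length_singleton]
          omega
        · rw [if_neg (by simp only [List.length_append, List.length_singleton, hwlen]; push_cast; omega)]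
          have h0 : ext.length - k.toNat = 0 := by omega
          rw [hw, h0, List.drop_zero,
            show (ext ++ [m]).length - k.toNat = 0 by simp only [List.length_append, List.length_singleton]; omega,
            List.drop_zero]
      · simp only [if_neg hk] at hw ⊢
        rw [hw]
        rw [if_pos (by simp only [List.nil_append, List.length_singleton]; omega)]
        rfl

-- ===== VERDICT (by name: the statement is the Claim_ definition above) =====
theorem find_nth_person_number_spec : Claim_equal_find_nth_person_number := by
  intro k n numbers _ _
  unfold Spec_find_nth_person_number find_nth_person_number find_nth_person_number_alt
  dsimp only
  congr 2
  apply pv_extend_eq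
  · by_cases h : n ≤ (numbers.length : Int)
    · right
      exact ⟨h, by omega⟩
    · left
      omega
  · by_cases hk : 0 < k
    · rw [if_pos hk, if_pos hk, PySem.List.slice_some_none]
      congr 1
      rw [show (-k) = -((k.toNat : Nat) : Int) by omega]
      rw [PySem.List.clampIdx_neg_natCast _ _ (by omega)]
    · rw [if_neg hk, if_neg hk]
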